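-- pv_equiv track=rewrite | github.com/gangbro-dev/Solving | pycharmProject/0822/연습문제1 후위표기법/S_01.py | split_mean
-- ===== SOURCE A (Python) =====
-- def split_mean(string):
--     split_list = []
--     temp = ''
--     for char in string:
--         if not char.isdecimal():
--             if temp:
--                 split_list.append(temp)
--                 temp = ''
--             split_list.append(char)
--         else:
--             temp += char
--     else:
--         if temp:
--             split_list.append(temp)
--
--     return split_list
-- ===== SOURCE B (Python) =====
-- from itertools import groupby
--
-- def split_mean(string):
--     tokens = []
--     for is_num, group in groupby(string, key=str.isdecimal):
--         if is_num:
--             tokens.append(''.join(group))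
--         else:
--             tokens.extend(group)
--     return tokens
-- ===== Notes on version B (the rewrite author's own statement) =====
-- stated objective: idiomatic
-- what changed: Replaces A's running-temp accumulator loop with itertools.groupby partitioning the string into maximal same-class runs, joining decimal runs and splatting non-decimal runs.
import Mathlib
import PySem

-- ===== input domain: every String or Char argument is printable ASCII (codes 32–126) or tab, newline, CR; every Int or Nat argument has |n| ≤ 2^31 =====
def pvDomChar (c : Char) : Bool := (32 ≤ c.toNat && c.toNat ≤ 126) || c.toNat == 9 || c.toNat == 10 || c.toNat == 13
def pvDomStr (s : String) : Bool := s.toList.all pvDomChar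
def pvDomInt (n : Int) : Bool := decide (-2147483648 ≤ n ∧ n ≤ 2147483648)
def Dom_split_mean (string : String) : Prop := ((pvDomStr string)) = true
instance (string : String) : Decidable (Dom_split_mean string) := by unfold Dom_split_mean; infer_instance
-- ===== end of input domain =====

-- B replaces A's running-temp accumulator loop by grouping the string into maximal
-- same-class runs first (itertools.groupby) and then shaping each run (idiomatic; same cost).


-- ===== PORT A =====
-- temp is carried as List Char (Python's growing str); char.isdecimal() = PySem.Chars.isdigit on ASCII
def split_mean (string : String) : List String :=
  let r := string.toList.foldl
    (fun (st : List String × List Char) char =>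
      if (PySem.Chars.isdigit char) = false then
        let st1 := if st.2 ≠ [] then (st.1 ++ [String.mk st.2], ([] : List Char)) else st
        (st1.1 ++ [String.mk [char]], st1.2)
      else
        (st.1, st.2 ++ [char]))
    ([], [])
  if r.2 ≠ [] then r.1 ++ [String.mk r.2] else r.1

-- ===== PORT B =====
-- itertools.groupby: maximal runs of equal key, in order
def pyGroupBy (key : Char → Bool) : List Char → List (Bool × List Char)
  | [] => []
  | c :: rest =>
    let k := key c
    (k, c :: rest.takeWhile (fun d => key d == k)) ::
      pyGroupBy key (rest.dropWhile (fun d => key d == k))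
termination_by l => l.length
decreasing_by
  simp only [List.length_cons]
  exact Nat.lt_succ_of_le (List.length_dropWhile_le _ _)

def split_mean_alt (string : String) : List String :=
  (pyGroupBy (fun c => PySem.Chars.isdigit c) string.toList).flatMap
    (fun g => if g.1 then [String.mk g.2] else g.2.map (fun c => String.mk [c]))

-- ===== PRECONDITION & SPEC =====
def Spec_split_mean (string : String) (out : List String) : Prop := out = split_mean_alt string
instance (string : String) (out : List String) : Decidable (Spec_split_mean string out) := by unfold Spec_split_mean; infer_instance

-- ===== CLAIM (what is proved, stated in full; the proofs are below) =====
def Claim_equal_split_mean : Prop := ∀ (string : String), Dom_split_mean string → Spec_split_mean string (split_mean string)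

-- ===== LEMMAS AND PROOFS =====

-- tokenizer in "remaining input under pending temp" form: bridge between the two ports
def tok (temp : List Char) : List Char → List String
  | [] => if temp ≠ [] then [String.mk temp] else []
  | c :: rest =>
    if (PySem.Chars.isdigit c) = false then
      (if temp ≠ [] then [String.mk temp] else []) ++ [String.mk [c]] ++ tok [] rest
    else tok (temp ++ [c]) rest

theorem foldl_eq_tok (l : List Char) : ∀ (acc : List String) (temp : List Char),
    (let r := l.foldl
      (fun (st : List String × List Char) char =>
        if (PySem.Chars.isdigit char) = false then
          let st1 := if st.2 ≠ [] then (st.1 ++ [String.mk st.2], ([] : List Char)) else st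
          (st1.1 ++ [String.mk [char]], st1.2)
        else
          (st.1, st.2 ++ [char]))
      (acc, temp)
     if r.2 ≠ [] then r.1 ++ [String.mk r.2] else r.1) = acc ++ tok temp l := by
  induction l with
  | nil => intro acc temp; by_cases h : temp = [] <;> simp [tok, h]
  | cons c rest ih =>
    intro acc temp
    by_cases hd : PySem.Chars.isdigit c = false
    · by_cases ht : temp = []
      · simpa [List.foldl_cons, hd, ht, tok, List.append_assoc] using ih (acc ++ [String.mk [c]]) []
      · simpa [List.foldl_cons, hd, ht, tok, List.append_assoc]
          using ih (acc ++ [String.mk temp] ++ [String.mk [c]]) []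
    · simpa [List.foldl_cons, hd, tok] using ih acc (temp ++ [c])

theorem dropWhile_head_false {p : Char → Bool} :
    ∀ (l : List Char) (c : Char) (t : List Char), l.dropWhile p = c :: t → p c = false := by
  intro l
  induction l with
  | nil => intro c t h; simp [List.dropWhile] at h
  | cons a l ih =>
    intro c t h
    by_cases ha : p a
    · exact ih c t (by simpa [List.dropWhile, ha] using h)
    · simp [List.dropWhile, ha] at h
      rcases h with ⟨h1, _⟩
      simpa [← h1] using ha

theorem tok_digits' : ∀ (run : List Char) (temp : List Char) (t : List Char),
    (∀ d ∈ run, PySem.Chars.isdigit d = true) →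
    tok temp (run ++ t) = tok (temp ++ run) t := by
  intro run
  induction run with
  | nil => intro temp t _; simp
  | cons c run ih =>
    intro temp t h
    have hc : PySem.Chars.isdigit c = true := h c (by simp)
    simp only [List.cons_append, tok, hc]
    simpa [List.append_assoc] using ih (temp ++ [c]) t (fun d hd => h d (by simp [hd]))

theorem tok_nondigits : ∀ (run : List Char) (t : List Char),
    (∀ d ∈ run, PySem.Chars.isdigit d = false) →
    tok [] (run ++ t) = run.map (fun c => String.mk [c]) ++ tok [] t := by
  intro run
  induction run with
  | nil => intro t _; simp
  | cons c run ih =>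
    intro t h
    have hc := h c (by simp)
    simp only [List.cons_append, tok, hc]
    simp [ih t (fun d hd => h d (by simp [hd]))]

theorem tok_flush (rest : List Char) (temp : List Char) (hne : temp ≠ [])
    (h : rest = [] ∨ ∃ d t, rest = d :: t ∧ PySem.Chars.isdigit d = false) :
    tok temp rest = String.mk temp :: tok [] rest := by
  rcases h with h | ⟨d, t, rfl, hd⟩
  · subst h; simp [tok, hne]
  · simp [tok, hd, hne]

theorem tok_eq_alt_aux : ∀ (n : Nat) (l : List Char), l.length ≤ n →
    tok [] l = (pyGroupBy (fun c => PySem.Chars.isdigit c) l).flatMap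
      (fun g => if g.1 then [String.mk g.2] else g.2.map (fun c => String.mk [c])) := by
  intro n
  induction n with
  | zero =>
    intro l hl
    rw [List.length_eq_zero_iff.mp (Nat.le_zero.mp hl)]
    simp [pyGroupBy, tok]
  | succ n ih =>
    intro l hl
    cases l with
    | nil => simp [pyGroupBy, tok]
    | cons c rest =>
      have hsplit : rest = rest.takeWhile (fun d => PySem.Chars.isdigit d == PySem.Chars.isdigit c)
          ++ rest.dropWhile (fun d => PySem.Chars.isdigit d == PySem.Chars.isdigit c) :=
        (List.takeWhile_append_dropWhile).symm
      generalize hrun : rest.takeWhile (fun d => PySem.Chars.isdigit d == PySem.Chars.isdigit c) = run at hsplit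
      generalize hrest' : rest.dropWhile (fun d => PySem.Chars.isdigit d == PySem.Chars.isdigit c) = rest' at hsplit
      have hrunk : ∀ d ∈ run, PySem.Chars.isdigit d = PySem.Chars.isdigit c := by
        intro d hd
        have := List.mem_takeWhile_imp (hrun ▸ hd)
        simpa using this
      have hhead : rest' = [] ∨ ∃ d t, rest' = d :: t ∧ PySem.Chars.isdigit d ≠ PySem.Chars.isdigit c := by
        cases h : rest' with
        | nil => exact Or.inl rfl
        | cons d t =>
          refine Or.inr ⟨d, t, rfl, ?_⟩
          have := dropWhile_head_false rest d t (by rw [hrest', h])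
          simpa using this
      have hlen : rest'.length ≤ n := by
        have := List.length_dropWhile_le (fun d => PySem.Chars.isdigit d == PySem.Chars.isdigit c) rest
        rw [hrest'] at this
        simp only [List.length_cons] at hl
        omega
      have ihr := ih rest' hlen
      have hgb : pyGroupBy (fun c => PySem.Chars.isdigit c) (c :: rest)
          = (PySem.Chars.isdigit c, c :: run) :: pyGroupBy (fun c => PySem.Chars.isdigit c) rest' := by
        rw [pyGroupBy]
        simp only [hrun, hrest']
      rw [hgb, hsplit]
      by_cases hkk : PySem.Chars.isdigit c = true
      · -- digit run: one joined token
        have h1 : tok [] (c :: (run ++ rest')) = tok ([c] ++ run) rest' := by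
          simp only [tok, hkk]
          exact tok_digits' run [c] rest' (fun d hd => (hrunk d hd).trans hkk)
        have h2 : tok (c :: run) rest' = String.mk (c :: run) :: tok [] rest' := by
          apply tok_flush _ _ (by simp)
          rcases hhead with h | ⟨d, t, heq, hd⟩
          · exact Or.inl h
          · refine Or.inr ⟨d, t, heq, ?_⟩
            cases hdd : PySem.Chars.isdigit d
            · rfl
            · exact absurd (hdd.trans hkk.symm) hd
        rw [h1]
        simp only [List.singleton_append]
        rw [h2, ihr]
        simp [hkk]
      · -- non-digit run: each char its own token
        have hc : PySem.Chars.isdigit c = false := by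
          cases h : PySem.Chars.isdigit c
          · rfl
          · exact absurd h hkk
        have h1 : tok [] (c :: (run ++ rest'))
            = String.mk [c] :: (run.map (fun d => String.mk [d]) ++ tok [] rest') := by
          simp only [tok, hc]
          rw [tok_nondigits run rest' (fun d hd => (hrunk d hd).trans hc)]
          simp
        rw [h1, ihr]
        simp [hc]

theorem tok_eq_alt (l : List Char) :
    tok [] l = (pyGroupBy (fun c => PySem.Chars.isdigit c) l).flatMap
      (fun g => if g.1 then [String.mk g.2] else g.2.map (fun c => String.mk [c])) :=
  tok_eq_alt_aux l.length l le_rfl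

-- ===== VERDICT (by name: the statement is the Claim_ definition above) =====
theorem split_mean_spec : Claim_equal_split_mean := by
  intro string _
  unfold Spec_split_mean split_mean split_mean_alt
  rw [foldl_eq_tok string.toList [] []]
  simpa using tok_eq_alt string.toList
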